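-- pv_equiv track=rewrite | github.com/sarospa/project-euler-python | euler-088.py | factor_groups
-- ===== SOURCE A (Python) =====
-- def factor_groups(vals):
-- 	if len(vals) == 1:
-- 		return (vals,)
-- 	smaller = factor_groups(vals[:len(vals)-1])
-- 	vals_partitioned = set()
-- 	last_val = vals[len(vals)-1]
-- 	for group in smaller:
-- 		for i in range(len(group)):
-- 			added_group = group[:i] + (group[i] * last_val,) + group[i+1:]
-- 			vals_partitioned.add(tuple(sorted(added_group)))
-- 		added_group = group + (last_val,)
-- 		vals_partitioned.add(tuple(sorted(added_group)))
-- 	return vals_partitioned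
-- ===== SOURCE B (Python) =====
-- def factor_groups(vals):
--     def absorb(group, last_val):
--         # all ways to multiply last_val into one slot of group, in slot order,
--         # then append it as a new singleton slot
--         if not group:
--             return [(last_val,)]
--         head, rest = group[0], group[1:]
--         return [(head * last_val,) + rest] + [(head,) + g for g in absorb(rest, last_val)]
--     groups = (tuple(vals[:1]),)
--     for last_val in vals[1:]:
--         new_groups = set()
--         for group in groups:
--             for g in absorb(group, last_val):
--                 new_groups.add(tuple(sorted(g)))
--         groups = new_groups
--     return groups
-- ===== Notes on version B (the rewrite author's own statement) =====
-- stated objective: alternative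
-- what changed: Replaces A's top-down recursion on ever-shorter prefixes with an iterative left fold over the values, and A's index loop over slots with a structural recursive 'absorb' helper that enumerates all extensions of a group.
import Mathlib
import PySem

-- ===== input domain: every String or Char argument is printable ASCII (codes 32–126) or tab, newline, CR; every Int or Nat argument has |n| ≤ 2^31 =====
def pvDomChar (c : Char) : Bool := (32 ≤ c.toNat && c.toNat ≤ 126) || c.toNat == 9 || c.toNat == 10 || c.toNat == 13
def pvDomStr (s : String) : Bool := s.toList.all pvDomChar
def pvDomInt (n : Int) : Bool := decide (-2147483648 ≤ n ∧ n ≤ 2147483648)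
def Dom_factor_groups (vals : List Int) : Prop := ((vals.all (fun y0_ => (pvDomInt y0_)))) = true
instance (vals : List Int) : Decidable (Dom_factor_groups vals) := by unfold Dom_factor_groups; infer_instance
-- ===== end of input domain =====

-- B replaces A's top-down recursion on the prefix by an iterative left fold over the
-- values, and A's index loop over slots by a structural 'absorb' helper; same results, same cost.

-- ===== PORT A =====
-- A's two inner loops for one group: merge last_val into every slot, then append it
def addGroupA (last_val : Int) (part : List (List Int)) (group : List Int) : List (List Int) :=
  let part := (PySem.List.pyRange 0 group.length 1).foldl (fun part i =>
    let added_group := PySem.List.slice group none (some i)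
      ++ [PySem.List.pyGetD group i 0 * last_val]          -- group[i], i ∈ range(len(group)): in range
      ++ PySem.List.slice group (some (i + 1)) none
    PySem.Set.add part (PySem.List.sorted added_group (fun x => x) false)) part
  PySem.Set.add part (PySem.List.sorted (group ++ [last_val]) (fun x => x) false)

def factor_groups (vals : List Int) : List (List Int) :=
  match vals with
  | [] => []          -- Python: the recursion never bottoms out here (RecursionError); excluded by Pre_
  | v :: vs =>
    if (v :: vs).length == 1 then [v :: vs]
    else
      let smaller := factor_groups (PySem.List.slice (v :: vs) none (some ((v :: vs).length - 1 : Int)))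
      let last_val := PySem.List.pyGetD (v :: vs) ((v :: vs).length - 1 : Int) 0  -- vals[len-1]: in range
      smaller.foldl (addGroupA last_val) PySem.Set.empty
termination_by vals.length
decreasing_by
  have h1 : ((v :: vs).length - 1 : Int) = ((vs.length : Nat) : Int) := by simp
  rw [h1, PySem.List.slice_to_natCast]
  simp

-- ===== PORT B =====
-- all ways to multiply last_val into one slot of group (in slot order) or append it
def absorbB (group : List Int) (last_val : Int) : List (List Int) :=
  match group with
  | [] => [[last_val]]
  | head :: rest => (head * last_val :: rest) :: (absorbB rest last_val).map (fun g => head :: g)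

def stepB (groups : List (List Int)) (last_val : Int) : List (List Int) :=
  groups.foldl (fun new_groups group =>
    (absorbB group last_val).foldl (fun new_groups g =>
      PySem.Set.add new_groups (PySem.List.sorted g (fun x => x) false)) new_groups)
    PySem.Set.empty

def factor_groups_alt (vals : List Int) : List (List Int) :=
  (PySem.List.slice vals (some 1) none).foldl stepB [PySem.List.slice vals none (some 1)]

-- ===== PRECONDITION & SPEC =====
-- Pre_ excludes only the empty list, on which A recurses without a base case and raises RecursionError
def Pre_factor_groups (vals : List Int) : Prop := vals ≠ []
instance (vals : List Int) : Decidable (Pre_factor_groups vals) := by unfold Pre_factor_groups; infer_instance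
def pvWitness_factor_groups : List Int := [2, 3, 4]

def Spec_factor_groups (vals : List Int) (out : List (List Int)) : Prop := out = factor_groups_alt vals
instance (vals : List Int) (out : List (List Int)) : Decidable (Spec_factor_groups vals out) := by unfold Spec_factor_groups; infer_instance

-- ===== CLAIM (what is proved, stated in full; the proofs are below) =====
def Claim_equal_factor_groups : Prop := ∀ (vals : List Int), Dom_factor_groups vals → Pre_factor_groups vals → Spec_factor_groups vals (factor_groups vals)

-- ===== LEMMAS AND PROOFS =====

-- absorbB enumerates exactly A's candidates: slot i for every i < len(group), then the appended one
theorem absorbB_spec (group : List Int) (last_val : Int) :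
    absorbB group last_val =
      (List.range group.length).map
        (fun i => group.take i ++ (group.getD i 0 * last_val) :: group.drop (i + 1))
      ++ [group ++ [last_val]] := by
  induction group with
  | nil => simp [absorbB]
  | cons head rest ih =>
    simp [absorbB, ih, List.range_succ_eq_map, List.map_map]

-- one group's contribution to the round is the same in both ports
theorem addGroup_eq (last_val : Int) (part : List (List Int)) (group : List Int) :
    addGroupA last_val part group =
      (absorbB group last_val).foldl (fun p g =>
        PySem.Set.add p (PySem.List.sorted g (fun x => x) false)) part := by
  rw [absorbB_spec, List.foldl_append]
  unfold addGroupA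
  simp only [List.foldl_cons, List.foldl_nil]
  congr 1
  rw [PySem.List.pyRange_zero_natCast, List.foldl_map, List.foldl_map]
  apply PySem.List.foldl_congr_mem
  intro acc i hi
  have hi' : i < group.length := List.mem_range.mp hi
  have h1 : ((i : Int) + 1) = (((i + 1 : Nat)) : Int) := by push_cast; ring
  rw [h1, PySem.List.slice_to_natCast, PySem.List.slice_from_natCast, PySem.List.pyGetD_natCast]
  simp

-- hence a whole round (incorporating one value into every grouping) is the same
theorem step_eq (smaller : List (List Int)) (last_val : Int) :
    smaller.foldl (addGroupA last_val) PySem.Set.empty = stepB smaller last_val := by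
  unfold stepB
  apply PySem.List.foldl_congr_mem
  intro acc g _
  exact addGroup_eq last_val acc g

-- A's recursion on the prefix is B's left fold over the values, for nonempty input
theorem main_eq : ∀ (vals : List Int), vals ≠ [] → factor_groups vals = factor_groups_alt vals := by
  intro vals
  induction vals using List.reverseRecOn with
  | nil => intro h; exact absurd rfl h
  | append_singleton ys z ih =>
    intro _
    cases ys with
    | nil =>
      show factor_groups [z] = factor_groups_alt [z]
      rw [factor_groups, factor_groups_alt]
      simp [PySem.List.slice]
    | cons y ys' =>
      have hA : factor_groups ((y :: ys') ++ [z])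
          = (factor_groups (y :: ys')).foldl (addGroupA z) PySem.Set.empty := by
        rw [List.cons_append, factor_groups]
        have hlen : ¬ ((y :: (ys' ++ [z])).length == 1) = true := by simp
        rw [if_neg hlen]
        have h1 : ((y :: (ys' ++ [z])).length - 1 : Int) = (((y :: ys').length : Nat) : Int) := by
          simp
        rw [h1, PySem.List.slice_to_natCast, PySem.List.pyGetD_natCast]
        have h2 : (y :: (ys' ++ [z])).take (y :: ys').length = y :: ys' := by
          rw [← List.cons_append]; exact List.take_left
        have h3 : (y :: (ys' ++ [z])).getD (y :: ys').length 0 = z := by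
          rw [← List.cons_append]
          rw [List.getD_eq_getElem _ _ (by simp)]
          simp
        rw [h2, h3]
      have hB : ∀ (ws : List Int), factor_groups_alt ((y :: ws) ++ [z])
          = stepB (factor_groups_alt (y :: ws)) z := by
        intro ws
        unfold factor_groups_alt
        rw [PySem.List.slice_from_one, PySem.List.slice_from_one,
          PySem.List.slice_to _ (by norm_num), PySem.List.slice_to _ (by norm_num)]
        simp [List.foldl_append]
      rw [hA, hB, step_eq, ih (by simp)]

-- ===== VERDICT (by name: the statement is the Claim_ definition above) =====
theorem factor_groups_spec : Claim_equal_factor_groups := by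
  intro vals _ hpre
  exact main_eq vals hpre
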